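-- pv_equiv track=rewrite | github.com/SurajBlazer/Discrete-Structures-Project-0053-0074 | main.py | build_binary_tree_edges
-- ===== SOURCE A (Python) =====
-- from typing import Tuple, Optional, List, Set, Any
--
-- def build_binary_tree_edges(level_list: List[Optional[str]]) -> List[tuple]:
--     """
--     Given a level-order list, return edges (parent, child) for non-None entries.
--     Indices follow heap-style: left = 2*i+1, right = 2*i+2.
--     """
--     edges: List[tuple] = []
--     n = len(level_list)
--     for i, val in enumerate(level_list):
--         if val is None:
--             continue
--         left = 2 * i + 1
--         right = 2 * i + 2
--         if left < n and level_list[left] is not None: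
--             edges.append((val, level_list[left]))
--         if right < n and level_list[right] is not None:
--             edges.append((val, level_list[right]))
--     return edges
-- ===== SOURCE B (Python) =====
-- def build_binary_tree_edges(level_list):
--     # Level-by-level (BFS) recursion: peel off one tree level at a time and pair
--     # each level's parents (each duplicated once) with the next level's slots.
--     def level(row, rest):
--         if not row or not rest:
--             return []
--         width = 2 * len(row)
--         children = rest[:width]
--         dup = [x for x in row for _ in (0, 1)]
--         edges = [(p, c) for p, c in zip(dup, children)
--                  if p is not None and c is not None]
--         return edges + level(children, rest[width:])
--     return level(level_list[:1], level_list[1:])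
-- ===== Notes on version B (the rewrite author's own statement) =====
-- stated objective: alternative
-- what changed: Replaces the index-arithmetic loop over parents (checking 2i+1/2i+2 against n) with a recursive level-by-level BFS that carries no indices at all: it repeatedly slices the next level off the list, duplicates the current row of parents, zips it with the children row, and recurses on the children.
import Mathlib
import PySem

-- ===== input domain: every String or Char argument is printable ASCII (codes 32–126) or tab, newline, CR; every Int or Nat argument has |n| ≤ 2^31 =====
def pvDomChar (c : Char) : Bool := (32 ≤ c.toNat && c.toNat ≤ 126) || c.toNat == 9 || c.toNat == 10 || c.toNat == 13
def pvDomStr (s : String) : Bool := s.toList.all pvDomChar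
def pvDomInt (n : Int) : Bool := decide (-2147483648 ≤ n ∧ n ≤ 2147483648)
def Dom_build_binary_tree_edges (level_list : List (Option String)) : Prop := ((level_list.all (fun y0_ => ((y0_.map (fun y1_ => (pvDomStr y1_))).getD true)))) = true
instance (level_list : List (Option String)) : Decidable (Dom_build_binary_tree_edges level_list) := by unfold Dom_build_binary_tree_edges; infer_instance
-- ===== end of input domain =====

-- B replaces A's index-arithmetic parent loop by an index-free recursive level-by-level BFS (slice next level, zip duplicated parents with children, recurse); same edges, same order.

-- ===== PORT A =====
-- parent-driven loop: for each non-None parent, append its existing left then right child edge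
def build_binary_tree_edges (level_list : List (Option String)) : List (String × String) :=
  let n := level_list.length
  level_list.zipIdx.foldl (fun edges p =>
    match p.1 with
    | none => edges
    | some v =>
      let left := 2 * p.2 + 1
      let right := 2 * p.2 + 2
      let edges :=
        if left < n then
          match level_list.getD left none with
          | some c => edges ++ [(v, c)]
          | none => edges
        else edges
      if right < n then
        match level_list.getD right none with
        | some c => edges ++ [(v, c)]
        | none => edges
      else edges) []

-- ===== PORT B =====
-- dup = [x for x in row for _ in (0, 1)]
def pvDup (row : List (Option String)) : List (Option String) :=
  row.flatMap (fun x => [x, x])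

-- the recursive helper 'level(row, rest)' of Source B; Python slices rest[:width] / rest[width:]
-- with width ≥ 0 are exactly take/drop
def pvLevel (row rest : List (Option String)) : List (String × String) :=
  if h : row = [] ∨ rest = [] then []
  else
    let width := 2 * row.length
    let children := rest.take width
    let edges := ((pvDup row).zip children).filterMap
      (fun pc => match pc.1, pc.2 with
        | some p, some c => some (p, c)
        | _, _ => none)
    edges ++ pvLevel children (rest.drop width)
termination_by rest.length
decreasing_by
  push_neg at h
  have hr : row ≠ [] := h.1
  have hrest : rest ≠ [] := h.2
  have h1 : 0 < row.length := List.length_pos_iff.mpr hr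
  have h2 : 0 < rest.length := List.length_pos_iff.mpr hrest
  simp only [List.length_drop]
  omega

-- level(level_list[:1], level_list[1:])
def build_binary_tree_edges_alt (level_list : List (Option String)) : List (String × String) :=
  pvLevel (level_list.take 1) (level_list.drop 1)

-- ===== PRECONDITION & SPEC =====
def Spec_build_binary_tree_edges (level_list : List (Option String)) (out : List (String × String)) : Prop := out = build_binary_tree_edges_alt level_list
instance (level_list : List (Option String)) (out : List (String × String)) : Decidable (Spec_build_binary_tree_edges level_list out) := by unfold Spec_build_binary_tree_edges; infer_instance

-- ===== CLAIM (what is proved, stated in full; the proofs are below) =====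
def Claim_equal_build_binary_tree_edges : Prop := ∀ (level_list : List (Option String)), Dom_build_binary_tree_edges level_list → Spec_build_binary_tree_edges level_list (build_binary_tree_edges level_list)

-- ===== LEMMAS AND PROOFS =====

-- the per-child edge (as a 0/1-element list)
def pvEdge (l : List (Option String)) (j : Nat) : List (String × String) :=
  match l.getD ((j - 1) / 2) none, l.getD j none with
  | some p, some c => [(p, c)]
  | _, _ => []

-- child-index characterisation both ports are reduced to
def pvChildForm (l : List (Option String)) : List (String × String) :=
  (List.range' 1 (l.length - 1)).flatMap (pvEdge l)

-- the in-range children of parent i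
def pvChildren (n i : Nat) : List Nat :=
  (if 2 * i + 1 < n then [2 * i + 1] else []) ++ (if 2 * i + 2 < n then [2 * i + 2] else [])

theorem pv_edge_left (l : List (Option String)) (i : Nat) :
    pvEdge l (2 * i + 1) =
      (match l.getD i none, l.getD (2 * i + 1) none with
       | some p, some c => [(p, c)]
       | _, _ => []) := by
  unfold pvEdge
  rw [show (2 * i + 1 - 1) / 2 = i from by omega]

theorem pv_edge_right (l : List (Option String)) (i : Nat) :
    pvEdge l (2 * i + 2) =
      (match l.getD i none, l.getD (2 * i + 2) none with
       | some p, some c => [(p, c)]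
       | _, _ => []) := by
  unfold pvEdge
  rw [show (2 * i + 2 - 1) / 2 = i from by omega]

-- per-parent contribution in A (the loop body with empty accumulator)
def pvStep (l : List (Option String)) (p : Option String × Nat) : List (String × String) :=
  match p.1 with
  | none => []
  | some v =>
    (if 2 * p.2 + 1 < l.length then
      match l.getD (2 * p.2 + 1) none with
      | some c => [(v, c)]
      | none => []
    else []) ++
    (if 2 * p.2 + 2 < l.length then
      match l.getD (2 * p.2 + 2) none with
      | some c => [(v, c)]
      | none => []
    else [])

theorem pv_A_eq_flatMap (l : List (Option String)) :
    build_binary_tree_edges l = l.zipIdx.flatMap (pvStep l) := by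
  have h : ∀ (acc : List (String × String)) (p : Option String × Nat),
      (match p.1 with
      | none => acc
      | some v =>
        let edges :=
          if 2 * p.2 + 1 < l.length then
            match l.getD (2 * p.2 + 1) none with
            | some c => acc ++ [(v, c)]
            | none => acc
          else acc
        if 2 * p.2 + 2 < l.length then
          match l.getD (2 * p.2 + 2) none with
          | some c => edges ++ [(v, c)]
          | none => edges
        else edges) = acc ++ pvStep l p := by
    intro acc p
    obtain ⟨v?, i⟩ := p
    cases v? with
    | none => simp [pvStep]
    | some v =>
      simp only [pvStep]
      split_ifs <;>
        cases l.getD (2 * i + 1) none <;>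
        cases l.getD (2 * i + 2) none <;>
        simp
  unfold build_binary_tree_edges
  simp only [h]
  exact PySem.List.foldl_append_eq_flatMap _ _ _

theorem pv_zipIdx_eq_map_range (l : List (Option String)) :
    l.zipIdx = (List.range l.length).map (fun i => (l.getD i none, i)) := by
  apply List.ext_getElem
  · simp
  · intro i h1 h2
    simp at h2
    simp [List.getElem_zipIdx, List.getD_eq_getElem?_getD, List.getElem?_eq_getElem h2]

theorem pv_step_eq (l : List (Option String)) (i : Nat) :
    pvStep l (l.getD i none, i) = (pvChildren l.length i).flatMap (pvEdge l) := by
  unfold pvStep pvChildren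
  rw [List.flatMap_append]
  cases hv : l.getD i none with
  | none =>
    split_ifs <;>
      simp only [List.flatMap_cons, List.flatMap_nil, pv_edge_left, pv_edge_right, hv,
        List.append_nil]
  | some v =>
    split_ifs <;>
      simp only [List.flatMap_cons, List.flatMap_nil, pv_edge_left, pv_edge_right, hv,
        List.append_nil, List.nil_append] <;>
      cases l.getD (2 * i + 1) none <;> cases l.getD (2 * i + 2) none <;> simp

theorem pv_children_eq_filter (n i : Nat) :
    pvChildren n i = [2 * i + 1, 2 * i + 2].filter (fun j => decide (j < n)) := by
  unfold pvChildren
  rw [List.filter_cons, List.filter_cons, List.filter_nil]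
  by_cases h1 : 2 * i + 1 < n <;> by_cases h2 : 2 * i + 2 < n <;> simp [h1, h2]

-- 1,2 | 3,4 | 5,6 | … : children of parents 0..n-1, unbounded, are exactly 1..2n in order
theorem pv_children_range (n : Nat) :
    (List.range n).flatMap (fun i => [2 * i + 1, 2 * i + 2]) = List.range' 1 (2 * n) := by
  induction n with
  | zero => rfl
  | succ n ih =>
    rw [List.range_succ, List.flatMap_append, ih]
    rw [show 2 * (n + 1) = (2 * n + 1) + 1 from by ring, List.range'_concat, List.range'_concat]
    simp [List.flatMap_cons]
    omega

theorem pv_filter_range' (n : Nat) :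
    (List.range' 1 (2 * n)).filter (fun j => decide (j < n)) = List.range' 1 (n - 1) := by
  rcases Nat.eq_zero_or_pos n with h | h
  · subst h; rfl
  · have hsplit : List.range' 1 (2 * n) = List.range' 1 (n - 1) ++ List.range' n (n + 1) := by
      have h0 := @List.range'_append 1 (n - 1) (n + 1) 1
      rw [show (1 : Nat) + 1 * (n - 1) = n from by omega] at h0
      rw [show (n - 1) + (n + 1) = 2 * n from by omega] at h0
      exact h0.symm
    rw [hsplit, List.filter_append]
    have h1 : (List.range' 1 (n - 1)).filter (fun j => decide (j < n)) = List.range' 1 (n - 1) := by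
      apply List.filter_eq_self.mpr
      intro a ha
      rw [List.mem_range'] at ha
      simp; omega
    have h2 : (List.range' n (n + 1)).filter (fun j => decide (j < n)) = [] := by
      apply List.filter_eq_nil_iff.mpr
      intro a ha
      rw [List.mem_range'] at ha
      simp; omega
    rw [h1, h2, List.append_nil]

theorem pv_filter_flatMap {a b : Type} (xs : List a) (g : a → List b) (p : b → Bool) :
    (xs.flatMap g).filter p = xs.flatMap (fun x => (g x).filter p) := by
  induction xs with
  | nil => rfl
  | cons x xs ih => simp [List.flatMap_cons, List.filter_append, ih]

-- A equals the child-index characterisation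
theorem pv_A_eq_childForm (l : List (Option String)) :
    build_binary_tree_edges l = pvChildForm l := by
  unfold pvChildForm
  rw [pv_A_eq_flatMap, pv_zipIdx_eq_map_range, List.flatMap_map]
  have hcong : (List.range l.length).flatMap (fun i => pvStep l (l.getD i none, i)) =
      (List.range l.length).flatMap (fun i => (pvChildren l.length i).flatMap (pvEdge l)) :=
    List.flatMap_congr (fun i _ => pv_step_eq l i)
  rw [hcong, ← List.flatMap_assoc]
  have hidx : (List.range l.length).flatMap (pvChildren l.length) = List.range' 1 (l.length - 1) := by
    calc (List.range l.length).flatMap (pvChildren l.length)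
        = (List.range l.length).flatMap
            (fun i => [2 * i + 1, 2 * i + 2].filter (fun j => decide (j < l.length))) :=
          List.flatMap_congr (fun i _ => pv_children_eq_filter l.length i)
      _ = ((List.range l.length).flatMap (fun i => [2 * i + 1, 2 * i + 2])).filter
            (fun j => decide (j < l.length)) := (pv_filter_flatMap _ _ _).symm
      _ = List.range' 1 (l.length - 1) := by
          rw [pv_children_range, pv_filter_range']
  rw [hidx]

-- duplicated row indexing: dup[t] = row[t/2]
theorem pv_dup_getD (row : List (Option String)) :
    ∀ t, (pvDup row).getD t none = row.getD (t / 2) none := by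
  induction row with
  | nil => intro t; simp [pvDup]
  | cons x r ih =>
    intro t
    match t with
    | 0 => rfl
    | 1 => rfl
    | t + 2 =>
      have : (t + 2) / 2 = t / 2 + 1 := by omega
      simp only [pvDup, List.flatMap_cons, List.cons_append, List.nil_append, List.getD_cons_succ,
        this]
      exact ih t

theorem pv_dup_length (row : List (Option String)) :
    (pvDup row).length = 2 * row.length := by
  induction row with
  | nil => rfl
  | cons x r ih => simp [pvDup] at ih ⊢; omega

-- the zip of the duplicated row with the children slice, as a map over child indices
theorem pv_zip_eq_map (l : List (Option String)) (s : Nat) (hs : 2 * s + 1 < l.length) :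
    (pvDup ((l.drop s).take (s + 1))).zip ((l.drop (2 * s + 1)).take (2 * s + 2)) =
      (List.range' (2 * s + 1) (min (2 * s + 2) (l.length - (2 * s + 1)))).map
        (fun j => (l.getD ((j - 1) / 2) none, l.getD j none)) := by
  have hrl : ((l.drop s).take (s + 1)).length = s + 1 := by simp; omega
  apply List.ext_getElem
  · simp [pv_dup_length, hrl]; omega
  · intro t h1 h2
    simp only [List.length_zip, pv_dup_length, hrl, List.length_take, List.length_drop] at h1
    have ht : t < min (2 * s + 2) (l.length - (2 * s + 1)) := by omega
    rw [List.getElem_zip, List.getElem_map, List.getElem_range']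
    have hdl : t < (pvDup ((l.drop s).take (s + 1))).length := by
      rw [pv_dup_length, hrl]; omega
    have hcl : t < ((l.drop (2 * s + 1)).take (2 * s + 2)).length := by
      simp; omega
    have hdup : (pvDup ((l.drop s).take (s + 1)))[t]'hdl = l.getD (s + t / 2) none := by
      rw [← List.getD_eq_getElem _ none hdl, pv_dup_getD]
      rw [List.getD_eq_getElem?_getD, List.getD_eq_getElem?_getD,
        List.getElem?_take_of_lt (show t / 2 < s + 1 by omega), List.getElem?_drop]
    have hchild : ((l.drop (2 * s + 1)).take (2 * s + 2))[t]'hcl = l.getD (2 * s + 1 + t) none := by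
      rw [← List.getD_eq_getElem _ none hcl]
      rw [List.getD_eq_getElem?_getD, List.getD_eq_getElem?_getD,
        List.getElem?_take_of_lt (show t < 2 * s + 2 by omega), List.getElem?_drop]
    rw [hdup, hchild, show 2 * s + 1 + 1 * t = 2 * s + 1 + t from by ring,
      show (2 * s + 1 + t - 1) / 2 = s + t / 2 from by omega]

theorem pv_filterMap_edge (l : List (Option String)) (js : List Nat) :
    (js.map (fun j => (l.getD ((j - 1) / 2) none, l.getD j none))).filterMap
      (fun pc : Option String × Option String => match pc.1, pc.2 with
        | some p, some c => some (p, c)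
        | _, _ => none) = js.flatMap (pvEdge l) := by
  induction js with
  | nil => rfl
  | cons j js ih =>
    simp only [List.map_cons, List.filterMap_cons, List.flatMap_cons, ← ih]
    unfold pvEdge
    cases l.getD ((j - 1) / 2) none <;> cases l.getD j none <;> simp

-- the main invariant: pvLevel on the row at [s, s+1) equals the child-index form from 2s+1 on
theorem pv_level_eq (l : List (Option String)) :
    ∀ (n s : Nat), l.length - s ≤ n →
      pvLevel ((l.drop s).take (s + 1)) (l.drop (2 * s + 1)) =
        (List.range' (2 * s + 1) (l.length - (2 * s + 1))).flatMap (pvEdge l) := by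
  intro n
  induction n with
  | zero =>
    intro s hs
    have h1 : l.length ≤ s := by omega
    rw [pvLevel]
    rw [dif_pos]
    · have : l.length - (2 * s + 1) = 0 := by omega
      rw [this]; rfl
    · left
      rw [List.drop_eq_nil_of_le h1]; rfl
  | succ n ih =>
    intro s hs
    by_cases hbig : 2 * s + 1 < l.length
    · have hrow : ((l.drop s).take (s + 1)) ≠ [] := by
        simp [List.take_eq_nil_iff]
        omega
      have hrest : l.drop (2 * s + 1) ≠ [] := by
        simp [List.drop_eq_nil_iff]; omega
      rw [pvLevel, dif_neg (by push_neg; exact ⟨hrow, hrest⟩)]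
      simp only
      have hrl : ((l.drop s).take (s + 1)).length = s + 1 := by
        simp; omega
      rw [hrl]
      have hwidth : 2 * (s + 1) = 2 * s + 2 := by ring
      rw [hwidth]
      -- the recursive call matches the statement at s' = 2s+1
      have htake : (l.drop (2 * s + 1)).take (2 * s + 2) =
          (l.drop (2 * s + 1)).take ((2 * s + 1) + 1) := by norm_num
      have hdrop : (l.drop (2 * s + 1)).drop (2 * s + 2) = l.drop (2 * (2 * s + 1) + 1) := by
        rw [List.drop_drop]; norm_num; congr 1; ring
      rw [pv_zip_eq_map l s hbig, pv_filterMap_edge, htake, hdrop,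
        ih (2 * s + 1) (by omega)]
      -- split the index range
      set c := min (2 * s + 2) (l.length - (2 * s + 1)) with hc
      have hsplit : List.range' (2 * s + 1) (l.length - (2 * s + 1)) =
          List.range' (2 * s + 1) c ++ List.range' (2 * (2 * s + 1) + 1)
            (l.length - (2 * (2 * s + 1) + 1)) := by
        have h0 := @List.range'_append (2 * s + 1) c (l.length - (2 * s + 1) - c) 1
        rw [show (2 * s + 1) + 1 * c = (2 * s + 1) + c from by ring] at h0
        rw [show c + (l.length - (2 * s + 1) - c) = l.length - (2 * s + 1) from by omega] at h0
        rw [← h0]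
        by_cases hmin : 2 * s + 2 ≤ l.length - (2 * s + 1)
        · have : c = 2 * s + 2 := by omega
          rw [this, show (2 * s + 1) + (2 * s + 2) = 2 * (2 * s + 1) + 1 from by ring,
            show l.length - (2 * s + 1) - (2 * s + 2) = l.length - (2 * (2 * s + 1) + 1) from by
              omega]
        · have hc1 : c = l.length - (2 * s + 1) := by omega
          have hc2 : l.length - (2 * (2 * s + 1) + 1) = 0 := by omega
          rw [hc1, hc2, show l.length - (2 * s + 1) - (l.length - (2 * s + 1)) = 0 from by omega]
          simp
      rw [hsplit, List.flatMap_append]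
    · -- no children at all: both sides empty
      have hz : l.length - (2 * s + 1) = 0 := by omega
      rw [hz, pvLevel, dif_pos]
      · rfl
      · right
        rw [List.drop_eq_nil_of_le (by omega)]

-- ===== VERDICT (by name: the statement is the Claim_ definition above) =====
theorem build_binary_tree_edges_spec : Claim_equal_build_binary_tree_edges := by
  intro l _
  unfold Spec_build_binary_tree_edges build_binary_tree_edges_alt
  have h0 : l.take 1 = (l.drop 0).take (0 + 1) := by simp
  have h1 : l.drop 1 = l.drop (2 * 0 + 1) := by norm_num
  rw [pv_A_eq_childForm, h0, h1, pv_level_eq l l.length 0 (by omega)]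
  unfold pvChildForm
  norm_num
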